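-- pv_equiv track=rewrite | github.com/p-seonggeun/algorithm | 프로그래머스/0/120869. 외계어 사전/외계어 사전.py | solution
-- ===== SOURCE A (Python) =====
-- def solution(spell, dic):
--     answer = 0
--
--     for i in dic :
--         dict = {}
--         for k in spell :
--             dict[k] = 0
--
--         for j in spell :
--             dict[j] = i.count(j)
--
--         if 0 not in list(dict.values()) :
--             return 1
--
--     return 2
-- ===== SOURCE B (Python) =====
-- def solution(spell, dic):
--     survivors = dic
--     for ch in spell:
--         survivors = [w for w in survivors if ch in w]
--     return 1 if survivors else 2
-- ===== Notes on version B (the rewrite author's own statement) =====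
-- stated objective: alternative
-- what changed: Inverts the loop structure: instead of scanning dic word by word and building a per-word count dictionary, B iterates over the spell characters and progressively filters the candidate word list, answering from whether any survivors remain.
import Mathlib
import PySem

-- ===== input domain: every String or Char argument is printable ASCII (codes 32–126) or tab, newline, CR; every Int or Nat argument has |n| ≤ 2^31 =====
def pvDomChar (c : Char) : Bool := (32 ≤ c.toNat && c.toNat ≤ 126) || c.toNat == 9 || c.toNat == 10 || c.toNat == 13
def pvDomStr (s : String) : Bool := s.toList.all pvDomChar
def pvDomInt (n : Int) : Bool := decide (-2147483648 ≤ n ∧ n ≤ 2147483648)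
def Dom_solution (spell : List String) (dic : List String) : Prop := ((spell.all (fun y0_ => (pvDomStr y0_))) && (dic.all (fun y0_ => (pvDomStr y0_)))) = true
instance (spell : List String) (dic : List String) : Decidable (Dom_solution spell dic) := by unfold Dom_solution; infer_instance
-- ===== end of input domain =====

-- B inverts the loops: it filters the word list by each spell character in turn (no per-word count dict); objective: alternative.

-- ===== PORT A =====
-- the loop body over dic: build the zero dict, overwrite with counts, test '0 not in values'
def solutionGoA (spell : List String) : List String → Int
  | [] => 2
  | i :: rest =>
    let d : PySem.Dict String Int := spell.foldl (fun d k => d.insert k 0) PySem.Dict.empty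
    let d2 : PySem.Dict String Int := spell.foldl (fun d j => d.insert j ((PySem.Str.count i j : Nat) : Int)) d
    if (0 : Int) ∉ d2.values then 1 else solutionGoA spell rest

def solution (spell : List String) (dic : List String) : Int :=
  solutionGoA spell dic

-- ===== PORT B =====
def solution_alt (spell : List String) (dic : List String) : Int :=
  let survivors := spell.foldl (fun surv ch => surv.filter (fun w => PySem.Str.isIn ch w)) dic
  if survivors.isEmpty then 2 else 1

-- ===== PRECONDITION & SPEC =====
def Spec_solution (spell : List String) (dic : List String) (out : Int) : Prop := out = solution_alt spell dic
instance (spell : List String) (dic : List String) (out : Int) : Decidable (Spec_solution spell dic out) := by unfold Spec_solution; infer_instance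

-- ===== CLAIM (what is proved, stated in full; the proofs are below) =====
def Claim_equal_solution : Prop := ∀ (spell : List String) (dic : List String), Dom_solution spell dic → Spec_solution spell dic (solution spell dic)

-- ===== LEMMAS AND PROOFS =====

theorem go_acc_le (sub : List Char) : ∀ (fuel : Nat) (s : List Char) (acc : Nat),
    acc ≤ PySem.Chars.count.go sub fuel s acc := by
  intro fuel
  induction fuel with
  | zero => intro s acc; simp [PySem.Chars.count.go]
  | succ n ih =>
    intro s acc
    cases s with
    | nil => simp [PySem.Chars.count.go]
    | cons h t =>
      rw [PySem.Chars.count.go]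
      split
      · exact le_trans (Nat.le_succ acc) (ih _ _)
      · exact ih _ _

theorem go_eq_acc_iff (sub : List Char) (hsub : sub ≠ []) :
    ∀ (fuel : Nat) (s : List Char) (acc : Nat), s.length ≤ fuel →
    (PySem.Chars.count.go sub fuel s acc = acc ↔ ¬ sub <:+: s) := by
  intro fuel
  induction fuel with
  | zero =>
    intro s acc hlen
    have hs : s = [] := by cases s <;> simp_all
    subst hs
    simp [PySem.Chars.count.go, List.infix_nil, hsub]
  | succ n ih =>
    intro s acc hlen
    cases s with
    | nil => simp [PySem.Chars.count.go, List.infix_nil, hsub]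
    | cons h t =>
      rw [PySem.Chars.count.go]
      split
      · rename_i hpre
        have hp : sub <+: h :: t := List.isPrefixOf_iff_prefix.mp hpre
        constructor
        · intro habs
          have := go_acc_le sub n (List.drop sub.length (h :: t)) (acc + 1)
          omega
        · intro hni; exact absurd hp.isInfix hni
      · rename_i hpre
        have hp : ¬ sub <+: h :: t := fun hh => hpre (List.isPrefixOf_iff_prefix.mpr hh)
        have ht : t.length ≤ n := by simp at hlen; omega
        rw [ih t acc ht]
        constructor
        · intro hni hinf
          rcases List.infix_cons_iff.mp hinf with h1 | h2
          · exact hp h1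
          · exact hni h2
        · intro hni ht2
          exact hni (List.infix_cons_iff.mpr (Or.inr ht2))

-- Python:  i.count(j) == 0  ↔  j not in i
theorem count_eq_zero_iff (i j : String) :
    PySem.Str.count i j = 0 ↔ PySem.Str.isIn j i = false := by
  rw [PySem.Str.count_eq, PySem.Str.isIn_eq, PySem.Chars.isIn_eq_false_iff]
  unfold PySem.Chars.count
  by_cases hj : j.toList = []
  · simp [hj, List.nil_infix]
  · simp only [List.isEmpty_iff, hj, if_false]
    exact go_eq_acc_iff j.toList hj i.toList.length i.toList 0 le_rfl

-- get? after the insert-fold: every key of l holds f k, others keep d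
theorem get?_foldl_insert (f : String → Int) :
    ∀ (l : List String) (d : PySem.Dict String Int) (k : String),
    (l.foldl (fun d j => d.insert j (f j)) d).get? k
      = if k ∈ l then some (f k) else d.get? k := by
  intro l
  induction l with
  | nil => intro d k; simp
  | cons a l ih =>
    intro d k
    simp only [List.foldl_cons, ih, PySem.Dict.get?_insert, List.mem_cons]
    by_cases hkl : k ∈ l
    · simp [hkl]
    · by_cases hka : k = a <;> simp [hkl, hka]

theorem mem_keys_foldl_insert (f : String → Int) :
    ∀ (l : List String) (d : PySem.Dict String Int) (k : String),
    k ∈ (l.foldl (fun d j => d.insert j (f j)) d).keys ↔ k ∈ l ∨ k ∈ d.keys := by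
  intro l
  induction l with
  | nil => intro d k; simp
  | cons a l ih =>
    intro d k
    simp only [List.foldl_cons, ih, PySem.Dict.mem_keys_insert, List.mem_cons]
    tauto

theorem nodup_keys_foldl_insert (f : String → Int) :
    ∀ (l : List String) (d : PySem.Dict String Int), d.keys.Nodup →
    (l.foldl (fun d j => d.insert j (f j)) d).keys.Nodup := by
  intro l
  induction l with
  | nil => intro d h; simpa
  | cons a l ih =>
    intro d h
    exact ih _ (PySem.Dict.nodup_keys_insert d a (f a) h)

-- the per-word condition of A, characterised
theorem zero_mem_values_iff (spell : List String) (i : String) :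
    ((0 : Int) ∈ ((spell.foldl (fun d j => d.insert j ((PySem.Str.count i j : Nat) : Int))
        (spell.foldl (fun d k => d.insert k 0) (PySem.Dict.empty : PySem.Dict String Int))).values))
      ↔ ∃ k ∈ spell, PySem.Str.count i k = 0 := by
  set f : String → Int := fun j => ((PySem.Str.count i j : Nat) : Int) with hf
  set g : String → Int := fun _ => (0 : Int) with hg
  set d1 := spell.foldl (fun d k => d.insert k (g k)) (PySem.Dict.empty : PySem.Dict String Int) with hd1
  set d2 := spell.foldl (fun d j => d.insert j (f j)) d1 with hd2
  have hnd1 : d1.keys.Nodup := nodup_keys_foldl_insert g spell PySem.Dict.empty (by simp)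
  have hnd2 : d2.keys.Nodup := nodup_keys_foldl_insert f spell d1 hnd1
  have hget : ∀ k, d2.get? k = if k ∈ spell then some (f k) else none := by
    intro k
    rw [hd2, get?_foldl_insert f, hd1, get?_foldl_insert g]
    by_cases hk : k ∈ spell <;> simp [hk]
  have hkeys : ∀ k, k ∈ d2.keys ↔ k ∈ spell := by
    intro k
    rw [hd2, mem_keys_foldl_insert f, hd1, mem_keys_foldl_insert g]
    simp
  rw [PySem.Dict.values_eq_map_keys d2 hnd2 0]
  simp only [List.mem_map]
  constructor
  · rintro ⟨k, hk, hv⟩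
    have hks : k ∈ spell := (hkeys k).mp hk
    rw [PySem.Dict.getD_eq_get?_getD, hget k, if_pos hks] at hv
    refine ⟨k, hks, ?_⟩
    simp only [hf, Option.getD_some] at hv
    exact_mod_cast hv
  · rintro ⟨k, hk, hv⟩
    refine ⟨k, (hkeys k).mpr hk, ?_⟩
    rw [PySem.Dict.getD_eq_get?_getD, hget k, if_pos hk]
    simp only [hf, Option.getD_some, hv, Nat.cast_zero]

-- A's result, characterised as an existence test over dic
theorem goA_characterisation (spell : List String) : ∀ (dic : List String),
    solutionGoA spell dic
      = if dic.any (fun w => spell.all (fun ch => PySem.Str.isIn ch w)) then 1 else 2 := by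
  intro dic
  induction dic with
  | nil => rfl
  | cons i rest ih =>
    rw [solutionGoA]
    have hiff : ((0 : Int) ∉ ((spell.foldl (fun d j => d.insert j ((PySem.Str.count i j : Nat) : Int))
        (spell.foldl (fun d k => d.insert k 0) (PySem.Dict.empty : PySem.Dict String Int))).values))
        ↔ (spell.all (fun ch => PySem.Str.isIn ch i) = true) := by
      constructor
      · intro hnot
        rw [List.all_eq_true]
        intro k hk
        by_contra hni
        have hb : PySem.Str.isIn k i = false := by
          cases hbv : PySem.Str.isIn k i
          · rfl
          · exact absurd hbv hni
        exact hnot ((zero_mem_values_iff spell i).mpr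
          ⟨k, hk, (count_eq_zero_iff i k).mpr hb⟩)
      · intro hall hmem
        obtain ⟨k, hk, h0⟩ := (zero_mem_values_iff spell i).mp hmem
        have hb := List.all_eq_true.mp hall k hk
        rw [(count_eq_zero_iff i k).mp h0] at hb
        simp at hb
    by_cases h : spell.all (fun ch => PySem.Str.isIn ch i) = true
    · rw [if_pos (hiff.mpr h), List.any_cons, h, Bool.true_or, if_pos rfl]
    · have hb : spell.all (fun ch => PySem.Str.isIn ch i) = false := by
        cases hv : spell.all (fun ch => PySem.Str.isIn ch i)
        · rfl
        · exact absurd hv h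
      rw [if_neg (fun hh => h (hiff.mp hh)), ih, List.any_cons, hb, Bool.false_or]

-- B's staged filtering collapses to one filter by the conjunction of all tests
theorem foldl_filter_eq (p : String → String → Bool) :
    ∀ (spell dic : List String),
    spell.foldl (fun surv ch => surv.filter (fun w => p ch w)) dic
      = dic.filter (fun w => spell.all (fun ch => p ch w)) := by
  intro spell
  induction spell with
  | nil => intro dic; simp
  | cons a spell ih =>
    intro dic
    rw [List.foldl_cons, ih, List.filter_filter]
    congr 1
    funext w
    simp [List.all_cons, Bool.and_comm]

-- ===== VERDICT (by name: the statement is the Claim_ definition above) =====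
theorem solution_spec : Claim_equal_solution := by
  intro spell dic _
  unfold Spec_solution solution solution_alt
  rw [goA_characterisation, foldl_filter_eq]
  cases hany : dic.any (fun w => spell.all (fun ch => PySem.Str.isIn ch w)) with
  | false =>
    have hnil : dic.filter (fun w => spell.all (fun ch => PySem.Str.isIn ch w)) = [] :=
      List.filter_eq_nil_iff.mpr (fun w hw => by
        simpa using List.any_eq_false.mp hany w hw)
    simp only [hnil]
    simp
  | true =>
    obtain ⟨w, hw, hp⟩ := List.any_eq_true.mp hany
    have hne : (dic.filter (fun w => spell.all (fun ch => PySem.Str.isIn ch w))).isEmpty = false := by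
      rw [List.isEmpty_eq_false_iff_exists_mem]
      exact ⟨w, List.mem_filter.mpr ⟨hw, hp⟩⟩
    simp only [hne]
    simp
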